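-- pv_equiv track=rewrite | github.com/kobihazout/Python-Project | Final.py | CheckCourseID
-- ===== SOURCE A (Python) =====
-- def CheckCourseID(num):
--     temp = int(num)
--     count = 0
--     while temp != 0:
--         count = count+1
--         temp = temp/10
--         temp = int(temp)
--     if count == 4:
--         return True
--     else:
--         return False
-- ===== SOURCE B (Python) =====
-- def CheckCourseID(num):
--     n = int(num)
--     return 1000 <= abs(n) <= 9999
-- ===== Notes on version B (the rewrite author's own statement) =====
-- stated objective: simpler
-- what changed: Replaces the digit-counting while loop with a single closed-form four-digit range test on the absolute value.
import Mathlib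
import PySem

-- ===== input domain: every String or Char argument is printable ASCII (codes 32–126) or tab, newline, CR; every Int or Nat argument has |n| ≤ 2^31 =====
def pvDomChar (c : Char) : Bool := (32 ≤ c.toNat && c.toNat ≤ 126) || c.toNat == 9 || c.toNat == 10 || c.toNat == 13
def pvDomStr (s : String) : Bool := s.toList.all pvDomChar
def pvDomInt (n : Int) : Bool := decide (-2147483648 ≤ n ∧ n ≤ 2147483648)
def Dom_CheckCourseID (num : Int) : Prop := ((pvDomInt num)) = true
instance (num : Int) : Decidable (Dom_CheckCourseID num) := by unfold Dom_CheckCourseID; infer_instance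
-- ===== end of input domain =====

-- B: closed-form range test 1000 <= |n| <= 9999 instead of A's digit-counting loop (simpler; return value only).
-- ===== PORT A =====
-- helper: the while loop of A, carrying (temp, count); int(temp/10) truncates toward 0 = Int.tdiv
def pvLoopA (temp : Int) (count : Int) : Int :=
  if temp ≠ 0 then pvLoopA (temp.tdiv 10) (count + 1) else count
  termination_by temp.natAbs
  decreasing_by
    rename_i h
    have h0 : temp.natAbs ≠ 0 := fun hz => h (Int.natAbs_eq_zero.mp hz)
    have he : (temp.tdiv 10).natAbs = temp.natAbs / 10 := by
      rw [Int.natAbs_tdiv]; rfl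
    rw [he]; omega

def CheckCourseID (num : Int) : Bool :=
  let temp := num          -- int(num) on an int is the identity
  let count := pvLoopA temp 0
  if count = 4 then true else false

-- ===== PORT B =====
def CheckCourseID_alt (num : Int) : Bool :=
  decide (1000 ≤ |num| ∧ |num| ≤ 9999)

-- ===== PRECONDITION & SPEC =====
def Spec_CheckCourseID (num : Int) (out : Bool) : Prop := out = CheckCourseID_alt num
instance (num : Int) (out : Bool) : Decidable (Spec_CheckCourseID num out) := by unfold Spec_CheckCourseID; infer_instance

-- ===== CLAIM (what is proved, stated in full; the proofs are below) =====
def Claim_equal_CheckCourseID : Prop := ∀ (num : Int), Dom_CheckCourseID num → Spec_CheckCourseID num (CheckCourseID num)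

-- ===== LEMMAS AND PROOFS =====

-- ===== VERDICT (by name: the statement is the Claim_ definition above) =====
-- range characterisation of the loop: if 10^k ≤ |t| < 10^(k+1) the loop returns c + (k+1); if t = 0 it returns c
theorem pvLoopA_zero (c : Int) : pvLoopA 0 c = c := by
  rw [pvLoopA]; simp

theorem pvLoopA_step (t c : Int) (h : t ≠ 0) : pvLoopA t c = pvLoopA (t.tdiv 10) (c + 1) := by
  rw [pvLoopA]; simp [h]

theorem natAbs_tdiv_ten (t : Int) : (t.tdiv 10).natAbs = t.natAbs / 10 := by
  rw [Int.natAbs_tdiv]; rfl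

theorem count_range : ∀ (k : Nat) (t c : Int), 10 ^ k ≤ t.natAbs → t.natAbs < 10 ^ (k + 1) → pvLoopA t c = c + (k + 1) := by
  intro k
  induction k with
  | zero =>
    intro t c h1 h2
    have ht : t ≠ 0 := by
      intro h; subst h; simp at h1
    rw [pvLoopA_step t c ht]
    have h2' : t.natAbs < 10 := by simpa using h2
    have hz : (t.tdiv 10).natAbs = 0 := by rw [natAbs_tdiv_ten]; omega
    rw [Int.natAbs_eq_zero.mp hz, pvLoopA_zero]
    norm_num
  | succ k ih =>
    intro t c h1 h2
    have e1 : (10:Nat) ^ (k + 1) = 10 ^ k * 10 := pow_succ 10 k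
    have e2 : (10:Nat) ^ (k + 2) = 10 ^ (k + 1) * 10 := pow_succ 10 (k + 1)
    have ht : t ≠ 0 := by
      intro h; subst h; simp at h1
    rw [pvLoopA_step t c ht]
    have hd := natAbs_tdiv_ten t
    rw [ih (t.tdiv 10) (c + 1) (by rw [hd]; omega) (by rw [hd]; omega)]
    push_cast; ring

theorem CheckCourseID_spec : Claim_equal_CheckCourseID := by
  intro num hdom
  unfold Spec_CheckCourseID CheckCourseID CheckCourseID_alt
  have hdom' : num.natAbs ≤ 2147483648 := by
    unfold Dom_CheckCourseID pvDomInt at hdom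
    simp at hdom
    omega
  set a := num.natAbs with ha
  have habs : |num| = (a : Int) := Int.abs_eq_natAbs num
  have key : pvLoopA num 0 = 4 ↔ (1000 ≤ a ∧ a ≤ 9999) := by
    by_cases h0 : num = 0
    · subst h0
      rw [pvLoopA_zero]
      simp [ha]
    have hane : a ≠ 0 := fun h => h0 (Int.natAbs_eq_zero.mp h)
    by_cases d0 : a < 10
    · have hc := count_range 0 num 0 (by norm_num; omega) (by norm_num; omega)
      rw [hc]; norm_num; omega
    by_cases d1 : a < 100
    · have hc := count_range 1 num 0 (by norm_num; omega) (by norm_num; omega)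
      rw [hc]; norm_num; omega
    by_cases d2 : a < 1000
    · have hc := count_range 2 num 0 (by norm_num; omega) (by norm_num; omega)
      rw [hc]; norm_num; omega
    by_cases d3 : a < 10000
    · have hc := count_range 3 num 0 (by norm_num; omega) (by norm_num; omega)
      rw [hc]; norm_num; omega
    by_cases d4 : a < 100000
    · have hc := count_range 4 num 0 (by norm_num; omega) (by norm_num; omega)
      rw [hc]; norm_num; omega
    by_cases d5 : a < 1000000
    · have hc := count_range 5 num 0 (by norm_num; omega) (by norm_num; omega)
      rw [hc]; norm_num; omega
    by_cases d6 : a < 10000000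
    · have hc := count_range 6 num 0 (by norm_num; omega) (by norm_num; omega)
      rw [hc]; norm_num; omega
    by_cases d7 : a < 100000000
    · have hc := count_range 7 num 0 (by norm_num; omega) (by norm_num; omega)
      rw [hc]; norm_num; omega
    by_cases d8 : a < 1000000000
    · have hc := count_range 8 num 0 (by norm_num; omega) (by norm_num; omega)
      rw [hc]; norm_num; omega
    have hc := count_range 9 num 0 (by norm_num; omega) (by norm_num; omega)
    rw [hc]; norm_num; omega
  by_cases h4 : pvLoopA num 0 = 4
  · have hr := key.mp h4
    simp only [h4, habs]
    have : (1000 : Int) ≤ (a : Int) ∧ (a : Int) ≤ 9999 := by omega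
    simp [this.1, this.2]
  · have hr : ¬(1000 ≤ a ∧ a ≤ 9999) := fun hc => h4 (key.mpr hc)
    simp only [if_neg h4, habs]
    symm
    simp only [decide_eq_false_iff_not]
    omega
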